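-- pv_equiv track=rewrite | github.com/pypi-data/pypi-mirror-49 | packages/entityinfo/entityinfo-0.1.tar.gz/entityinfo-0.1/entityinfo/bizname.py | match_index
-- ===== SOURCE A (Python) =====
-- from collections import Counter, defaultdict
-- from itertools import chain
--
-- def match_index(a, b):
--     '''
--     Search a in b and return the index of matched element from b
--
--     params:
--     args1 a(list): a list of string to search
--     args2 b(list): a list to match
--
--     Returns:
--         match_index(list): index of element of b that are in a
--     '''
--     # create a dict of all element with its index(index of duplicate elem)
--     if not isinstance(a, (list, str)):
--         raise ValueError('{} should be a string or list'.format(a))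
--     if isinstance(a, str):
--         a = [a]
--     if not isinstance(b, list):
--         raise ValueError('{} should be a list'.format(b))
--     dd = defaultdict(list)  # a defaultdict
--     for index, element in enumerate(b):
--         dd[element].append(index)
--     match_index = []
--     # matching elements of a with the element of defaultdict
--     for element in a:
--         if element in dd.keys():
--             match_index.append(dd[element])
--     match_index = list(chain.from_iterable(match_index))
--     match_index.sort()
--     return match_index
-- ===== SOURCE B (Python) =====
-- from collections import Counter
--
-- def match_index(a, b):
--     '''
--     Search a in b and return the index of matched element from b
--     '''
--     if not isinstance(a, (list, str)):
--         raise ValueError('{} should be a string or list'.format(a))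
--     if isinstance(a, str):
--         a = [a]
--     if not isinstance(b, list):
--         raise ValueError('{} should be a list'.format(b))
--     ac = Counter(a)
--     result = []
--     for i, el in enumerate(b):
--         if el in ac:
--             result.extend([i] * ac[el])
--     return result
-- ===== Notes on version B (the rewrite author's own statement) =====
-- stated objective: simpler
-- what changed: Instead of grouping b's indices per element in a defaultdict, scanning a, chaining the lists and sorting, B counts a once with Counter and makes a single pass over enumerate(b), emitting each index repeated by its count in a; index order already yields the sorted result, so the chain and the final sort disappear.
import Mathlib
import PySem

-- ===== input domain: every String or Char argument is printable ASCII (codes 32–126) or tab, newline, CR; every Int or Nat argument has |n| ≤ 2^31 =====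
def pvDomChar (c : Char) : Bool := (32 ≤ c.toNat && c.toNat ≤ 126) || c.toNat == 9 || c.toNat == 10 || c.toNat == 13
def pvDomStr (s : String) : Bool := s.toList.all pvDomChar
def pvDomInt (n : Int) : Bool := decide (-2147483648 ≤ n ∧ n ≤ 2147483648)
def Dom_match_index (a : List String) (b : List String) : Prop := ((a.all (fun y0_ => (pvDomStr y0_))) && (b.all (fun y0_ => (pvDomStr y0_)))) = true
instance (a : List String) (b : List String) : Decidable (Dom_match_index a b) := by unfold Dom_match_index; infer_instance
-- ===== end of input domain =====

-- B replaces A's group-indices-by-element dict + chain + sort with one counted pass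
-- over enumerate(b); index order already yields the sorted result, so the sort is not needed (objective: simpler).

-- ===== PORT A =====
def match_index (a : List String) (b : List String) : List Int :=
  -- dd = defaultdict(list); for index, element in enumerate(b): dd[element].append(index)
  let dd := (PySem.List.enumerate b 0).foldl
    (fun d p => d.modify p.2 [] (fun l => l ++ [p.1])) PySem.Dict.empty
  -- for element in a: if element in dd.keys(): match_index.append(dd[element])
  let mi := a.foldl
    (fun acc el => if dd.contains el then acc ++ [dd.getD el []] else acc)
    ([] : List (List Int))
  -- match_index = list(chain.from_iterable(match_index)); match_index.sort()
  PySem.List.sorted (mi.flatMap id) (fun x => x) false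

-- ===== PORT B =====
def match_index_alt (a : List String) (b : List String) : List Int :=
  -- ac = Counter(a)
  let ac := PySem.Dict.counter a
  -- for i, el in enumerate(b): if el in ac: result.extend([i] * ac[el])
  (PySem.List.enumerate b 0).foldl
    (fun acc p => if ac.contains p.2 then acc ++ PySem.List.pyRepeat [p.1] (ac.getD p.2 0) else acc)
    ([] : List Int)

-- ===== PRECONDITION & SPEC =====
def Spec_match_index (a : List String) (b : List String) (out : List Int) : Prop := out = match_index_alt a b
instance (a : List String) (b : List String) (out : List Int) : Decidable (Spec_match_index a b out) := by unfold Spec_match_index; infer_instance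

-- ===== CLAIM (what is proved, stated in full; the proofs are below) =====
def Claim_equal_match_index : Prop := ∀ (a : List String) (b : List String), Dom_match_index a b → Spec_match_index a b (match_index a b)

-- ===== LEMMAS AND PROOFS =====

-- the indices (as produced by enumerate(b)) at which `el` occurs in b
def idxOf (b : List String) (el : String) : List Int :=
  ((PySem.List.enumerate b 0).filter (fun p => p.2 == el)).map (·.1)

-- the common canonical form: each index of b, repeated by its element's count in a
def canon (a : List String) (b : List String) : List Int :=
  (PySem.List.enumerate b 0).flatMap (fun p => List.replicate (a.count p.2) p.1)

theorem alt_eq_canon (a b : List String) : match_index_alt a b = canon a b := by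
  unfold match_index_alt canon
  rw [PySem.List.foldl_congr_mem (g := fun acc p => acc ++ List.replicate (a.count p.2) p.1)]
  · rw [PySem.List.foldl_append_eq_flatMap]
    simp
  · intro acc p _
    by_cases h : p.2 ∈ a
    · simp [PySem.Dict.contains_counter, h, PySem.Dict.getD_counter, PySem.List.pyRepeat_singleton]
    · simp [PySem.Dict.contains_counter, h, List.count_eq_zero_of_not_mem h]

theorem getD_grouping_eq_idxOf (b : List String) (el : String) :
    (((PySem.List.enumerate b 0).foldl
      (fun d p => d.modify p.2 [] (fun l => l ++ [p.1])) PySem.Dict.empty).getD el [])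
    = idxOf b el := by
  have h : (PySem.List.enumerate b 0).foldl
      (fun d p => d.modify p.2 [] (fun l => l ++ [p.1])) PySem.Dict.empty
    = ((PySem.List.enumerate b 0).map (fun p => (p.2, p.1))).foldl
      (fun d q => d.modify q.1 [] (fun l => l ++ [q.2])) PySem.Dict.empty := by
    rw [List.foldl_map]
  rw [h, PySem.Dict.getD_foldl_modify_append]
  simp [idxOf, List.filter_map, List.map_map, Function.comp_def]

theorem flatMap_filter_eq {α β : Type} (l : List α) (c : α → Bool) (g : α → List β)
    (h : ∀ x ∈ l, c x = false → g x = []) :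
    (l.filter c).flatMap g = l.flatMap g := by
  induction l with
  | nil => rfl
  | cons x t ih =>
    by_cases hc : c x <;>
      simp [hc, ih (fun y hy => h y (List.mem_cons_of_mem _ hy)), h x (List.mem_cons_self)]

theorem a_unsorted_eq (a b : List String) :
    ((a.foldl (fun acc el =>
        if ((PySem.List.enumerate b 0).foldl
              (fun d p => d.modify p.2 [] (fun l => l ++ [p.1])) PySem.Dict.empty).contains el
        then acc ++ [((PySem.List.enumerate b 0).foldl
              (fun d p => d.modify p.2 [] (fun l => l ++ [p.1])) PySem.Dict.empty).getD el []]
        else acc) ([] : List (List Int))).flatMap id)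
    = a.flatMap (idxOf b) := by
  rw [PySem.List.foldl_append_if]
  simp only [List.nil_append, List.flatMap_map, id]
  rw [flatMap_filter_eq _ _ _ (fun x _ hx => PySem.Dict.getD_of_not_contains _ _ hx)]
  congr 1
  funext el
  exact getD_grouping_eq_idxOf b el

theorem flatMap_ite_singleton {α β : Type} (l : List α) (q : α → Bool) (f : α → β) :
    l.flatMap (fun x => if q x then [f x] else []) = (l.filter q).map f := by
  induction l with
  | nil => rfl
  | cons x t ih => by_cases h : q x <;> simp [h, ih]

theorem flatMap_append_perm {α β : Type} [DecidableEq β] (l : List α) (f g : α → List β) :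
    (l.flatMap (fun x => f x ++ g x)).Perm (l.flatMap f ++ l.flatMap g) := by
  induction l with
  | nil => simp
  | cons x t ih =>
    simp only [List.flatMap_cons]
    refine (ih.append_left (f x ++ g x)).trans ?_
    rw [List.perm_iff_count]
    intro y
    simp [List.count_append]
    omega

theorem perm_canon (a b : List String) : (canon a b).Perm (a.flatMap (idxOf b)) := by
  induction a with
  | nil => simp [canon]
  | cons x t ih =>
    have hsplit : canon (x :: t) b =
        (PySem.List.enumerate b 0).flatMap
          (fun p => List.replicate (t.count p.2) p.1 ++ (if p.2 == x then [p.1] else [])) := by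
      unfold canon
      congr 1
      funext p
      by_cases h : p.2 = x
      · simp [h, List.replicate_succ']
      · simp [h, Ne.symm h]
    rw [hsplit, List.flatMap_cons]
    refine (flatMap_append_perm _ _ _).trans ?_
    rw [flatMap_ite_singleton]
    exact (List.perm_append_comm).trans (ih.append_left _)

theorem canon_pairwise (a b : List String) : (canon a b).Pairwise (· ≤ ·) := by
  unfold canon
  rw [List.pairwise_flatMap]
  constructor
  · intro p _
    exact List.pairwise_replicate.mpr (Or.inr le_rfl)
  · refine (PySem.List.pairwise_lt_enumerate (xs := b) (s := 0)).imp ?_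
    intro p q hpq y hy z hz
    rw [List.eq_of_mem_replicate hy, List.eq_of_mem_replicate hz]
    exact le_of_lt hpq

-- ===== VERDICT (by name: the statement is the Claim_ definition above) =====
theorem match_index_spec : Claim_equal_match_index := by
  intro a b _
  unfold Spec_match_index
  simp only [match_index]
  rw [a_unsorted_eq a b, alt_eq_canon]
  exact PySem.List.sorted_id_eq_of_perm_of_pairwise _ _ (perm_canon a b) (canon_pairwise a b)
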